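-- pv_equiv track=rewrite | github.com/rysweet/gadugi | src/recipe_executor/recipe_decomposer.py | _find_related_requirements
-- ===== SOURCE A (Python) =====
-- from typing import List, Optional, Tuple, cast
--
-- def _find_related_requirements(component_name: str, requirements: List[str]) -> List[str]:
--     """Find requirements related to a specific component."""
--     related: List[str] = []
--     component_keywords = component_name.lower().split()
--
--     for req in requirements:
--         req_lower = req.lower()
--         if any(keyword in req_lower for keyword in component_keywords):
--             related.append(req)
--
--     return related
-- ===== SOURCE B (Python) =====
-- from typing import List
--
-- def _find_related_requirements(component_name: str, requirements: List[str]) -> List[str]: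
--     """Bucket index by first character: keywords are grouped by their first character once,
--     then each requirement is scanned position by position, consulting only the bucket of the
--     character at that position (a startswith test) instead of running a full substring search
--     per keyword."""
--     index = {}
--     for kw in component_name.lower().split():
--         index.setdefault(kw[:1], []).append(kw)
--
--     def matches(low: str) -> bool:
--         for j, c in enumerate(low):
--             for kw in index.get(c, ()):
--                 if low.startswith(kw, j):
--                     return True
--         return False
--
--     return [req for req in requirements if matches(req.lower())]
-- ===== Notes on version B (the rewrite author's own statement) =====
-- stated objective: alternative
-- what changed: Replaced the per-requirement any-keyword substring test by a first-character bucket index: keywords are grouped once in a dict keyed by their first character, then each requirement is scanned position by position, consulting only the bucket of the character at that position with a startswith test.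
import Mathlib
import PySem

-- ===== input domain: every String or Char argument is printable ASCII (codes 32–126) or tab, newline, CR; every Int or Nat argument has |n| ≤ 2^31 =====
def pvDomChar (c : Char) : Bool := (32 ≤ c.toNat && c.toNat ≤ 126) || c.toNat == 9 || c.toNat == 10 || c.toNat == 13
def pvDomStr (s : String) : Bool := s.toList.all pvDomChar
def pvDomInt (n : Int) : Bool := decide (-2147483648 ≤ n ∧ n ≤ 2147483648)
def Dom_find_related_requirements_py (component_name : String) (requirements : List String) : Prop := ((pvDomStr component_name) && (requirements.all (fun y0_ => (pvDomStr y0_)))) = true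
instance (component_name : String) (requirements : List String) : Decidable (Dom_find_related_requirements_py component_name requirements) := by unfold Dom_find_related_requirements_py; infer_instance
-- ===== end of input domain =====

-- B replaces A's per-requirement any-keyword substring test by a first-character bucket index:
-- keywords are grouped once by their first character, then each requirement is scanned position
-- by position, consulting only the bucket of the character at that position. Same return value.

-- ===== PORT A =====
-- A: for each requirement, append it when any keyword is a substring of its lowercase form.
def find_related_requirements_py (component_name : String) (requirements : List String) : List String :=
  let component_keywords := PySem.Str.split₀ (PySem.Str.lower component_name)
  requirements.foldl
    (fun related req =>
      let req_lower := PySem.Str.lower req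
      if component_keywords.any (fun keyword => PySem.Str.isIn keyword req_lower) then
        related ++ [req]
      else related)
    []

-- ===== PORT B =====
-- index.setdefault(kw[:1], []).append(kw): its effect on the dict is exactly
-- "store at key kw[:1] the old bucket (default []) with kw appended".
def pvBuildIndex (kws : List String) : PySem.Dict String (List String) :=
  kws.foldl
    (fun d kw =>
      let k := PySem.Str.slice kw none (some 1)
      d.insert k (d.getD k [] ++ [kw]))
    PySem.Dict.empty

-- for j, c in enumerate(low): for kw in index.get(c, ()): if low.startswith(kw, j): return True
-- (low.startswith(kw, j) with 0 ≤ j ≤ len(low) is exactly: kw is a prefix of low[j:];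
-- iterating a Python str yields 1-character strings, hence the String.ofList [c] key).
def pvMatches (index : PySem.Dict String (List String)) (low : String) : Bool :=
  (PySem.List.enumerate low.toList).any
    (fun jc =>
      (index.getD (String.ofList [jc.2]) []).any
        (fun kw => PySem.Chars.startswith (low.toList.drop jc.1.toNat) kw.toList))

def find_related_requirements_py_alt (component_name : String) (requirements : List String) : List String :=
  let index := pvBuildIndex (PySem.Str.split₀ (PySem.Str.lower component_name))
  requirements.filter (fun req => pvMatches index (PySem.Str.lower req))

-- ===== PRECONDITION & SPEC =====
def Spec_find_related_requirements_py (component_name : String) (requirements : List String) (out : List String) : Prop := out = find_related_requirements_py_alt component_name requirements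
instance (component_name : String) (requirements : List String) (out : List String) : Decidable (Spec_find_related_requirements_py component_name requirements out) := by unfold Spec_find_related_requirements_py; infer_instance

-- ===== CLAIM (what is proved, stated in full; the proofs are below) =====
def Claim_equal_find_related_requirements_py : Prop := ∀ (component_name : String) (requirements : List String), Dom_find_related_requirements_py component_name requirements → Spec_find_related_requirements_py component_name requirements (find_related_requirements_py component_name requirements)

-- ===== LEMMAS AND PROOFS =====

-- every token produced by str.split() is nonempty (invariant of split₀.go)
lemma split₀_go_ne_nil (s cur : List Char) (acc : List (List Char))
    (hacc : ∀ t ∈ acc, t ≠ []) :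
    ∀ t ∈ PySem.Chars.split₀.go s cur acc, t ≠ [] := by
  induction s generalizing cur acc with
  | nil =>
    intro t ht
    unfold PySem.Chars.split₀.go at ht
    split at ht
    · exact hacc t (by simpa using ht)
    · rcases (by simpa using ht : t ∈ acc ∨ t = cur.reverse) with h | h
      · exact hacc t h
      · subst h
        simp only [ne_eq, List.reverse_eq_nil_iff]
        rename_i hcur
        simpa [List.isEmpty_iff] using hcur
  | cons c rest ih =>
    intro t ht
    unfold PySem.Chars.split₀.go at ht
    split at ht
    · split at ht
      · exact ih [] acc hacc t ht
      · refine ih [] (cur.reverse :: acc) ?_ t ht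
        intro u hu
        rcases List.mem_cons.mp hu with h | h
        · subst h
          simp only [ne_eq, List.reverse_eq_nil_iff]
          rename_i hcur
          simpa [List.isEmpty_iff] using hcur
        · exact hacc u h
    · exact ih (c :: cur) acc hacc t ht

lemma split₀_ne_nil (s : List Char) : ∀ t ∈ PySem.Chars.split₀ s, t ≠ [] := by
  intro t ht
  exact split₀_go_ne_nil s [] [] (by simp) t ht

lemma str_split₀_ne_nil (s : String) : ∀ kw ∈ PySem.Str.split₀ s, kw.toList ≠ [] := by
  intro kw hkw
  have : kw.toList ∈ (PySem.Str.split₀ s).map String.toList := List.mem_map_of_mem hkw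
  rw [PySem.Str.split₀_map_toList] at this
  exact split₀_ne_nil _ _ this

-- lookup in the built index: kw is in bucket k iff kw is a keyword whose first-char slice is k
lemma getD_buildIndex (kws : List String) (d : PySem.Dict String (List String)) (k : String) :
    (kws.foldl
      (fun d kw =>
        let K := PySem.Str.slice kw none (some 1)
        d.insert K (d.getD K [] ++ [kw])) d).getD k []
    = d.getD k [] ++ kws.filter (fun kw => PySem.Str.slice kw none (some 1) == k) := by
  induction kws generalizing d with
  | nil => simp
  | cons kw rest ih =>
    simp only [List.foldl_cons, List.filter_cons, ih]
    rw [PySem.Dict.getD_insert]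
    by_cases h : PySem.Str.slice kw none (some 1) = k
    · simp [h]
    · simp [h, Ne.symm h]

lemma mem_buildIndex (kws : List String) (k kw : String) :
    kw ∈ (pvBuildIndex kws).getD k [] ↔ kw ∈ kws ∧ PySem.Str.slice kw none (some 1) = k := by
  unfold pvBuildIndex
  rw [getD_buildIndex]
  simp [List.mem_filter]

-- kw[:1] of a nonempty keyword is its first character as a 1-char string
lemma slice_one_of_head (kw : String) (c : Char) (tl : List Char) (h : kw.toList = c :: tl) :
    PySem.Str.slice kw none (some 1) = String.ofList [c] := by
  have h1 : (PySem.Str.slice kw none (some 1)).toList = [c] := by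
    rw [PySem.Str.toList_slice]
    simp only [PySem.Chars.slice_eq_listSlice]
    rw [show ((1 : Int)) = ((1 : Nat) : Int) from rfl, PySem.List.slice_to_natCast, h]
    rfl
  apply String.ext
  simpa using h1

-- the scan with the bucket index decides "some keyword is a substring"
lemma matches_eq_any (kws : List String) (hne : ∀ kw ∈ kws, kw.toList ≠ []) (low : String) :
    pvMatches (pvBuildIndex kws) low
      = kws.any (fun kw => PySem.Str.isIn kw low) := by
  rcases hB : pvMatches (pvBuildIndex kws) low with _ | _
  · -- B says false: no keyword is a substring
    symm
    rw [List.any_eq_false]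
    intro kw hkw
    simp only [Bool.not_eq_true]
    rcases hI : PySem.Str.isIn kw low with _ | _
    · rfl
    · exfalso
      have hinf : kw.toList <:+: low.toList := (PySem.Str.isIn_iff_infix kw low).mp hI
      obtain ⟨s, t, hst⟩ := hinf
      obtain ⟨c, tl, hkwl⟩ : ∃ c tl, kw.toList = c :: tl := by
        cases h : kw.toList with
        | nil => exact absurd h (hne kw hkw)
        | cons a b => exact ⟨a, b, rfl⟩
      have hB' : pvMatches (pvBuildIndex kws) low = true := by
        unfold pvMatches
        rw [List.any_eq_true]
        refine ⟨((s.length : Int), c), ?_, ?_⟩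
        · rw [PySem.List.mem_enumerate_iff]
          refine ⟨s.length, ?_, ?_⟩
          · have hlen : low.toList.length = s.length + kw.toList.length + t.length := by
              rw [← hst]; simp [Nat.add_assoc]
            have hkl : kw.toList.length = tl.length + 1 := by rw [hkwl]; rfl
            omega
          · have hget : low.toList[s.length]? = some c := by
              rw [← hst, hkwl, List.append_assoc,
                List.getElem?_append_right (le_refl s.length)]
              simp
            have hlen : low.toList.length = s.length + kw.toList.length + t.length := by
              rw [← hst]; simp [Nat.add_assoc]
            have hkl : kw.toList.length = tl.length + 1 := by rw [hkwl]; rfl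
            have := List.getElem?_eq_getElem (l := low.toList) (i := s.length) (by omega)
            rw [this] at hget
            simp [Option.some.injEq] at hget
            simp [hget]
        · rw [List.any_eq_true]
          refine ⟨kw, ?_, ?_⟩
          · rw [mem_buildIndex]
            exact ⟨hkw, slice_one_of_head kw c tl hkwl⟩
          · rw [PySem.Chars.startswith_iff]
            have hdrop : low.toList.drop s.length = kw.toList ++ t := by
              rw [← hst, List.append_assoc, List.drop_left]
            simp only [Int.toNat_natCast, hdrop]
            exact List.prefix_append _ _
      rw [hB] at hB'; exact absurd hB' (by simp)
  · -- B says true: produce the keyword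
    symm
    unfold pvMatches at hB
    rw [List.any_eq_true] at hB
    obtain ⟨⟨j, c⟩, hjc, hbucket⟩ := hB
    rw [PySem.List.mem_enumerate_iff] at hjc
    obtain ⟨k, hk, hp⟩ := hjc
    rw [List.any_eq_true] at hbucket
    obtain ⟨kw, hkwmem, hsw⟩ := hbucket
    rw [mem_buildIndex] at hkwmem
    rw [List.any_eq_true]
    refine ⟨kw, hkwmem.1, ?_⟩
    rw [PySem.Str.isIn_iff_infix]
    rw [PySem.Chars.startswith_iff] at hsw
    exact hsw.isInfix.trans (List.drop_suffix _ _).isInfix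

-- A's conditional-append fold is a filter
lemma portA_eq_filter (p : String → Bool) (reqs : List String) :
    reqs.foldl (fun related req => if p req then related ++ [req] else related) []
      = reqs.filter p := by
  simpa using PySem.List.foldl_append_if_eq_filter p reqs []

-- ===== VERDICT (by name: the statement is the Claim_ definition above) =====
theorem find_related_requirements_py_spec : Claim_equal_find_related_requirements_py := by
  intro component_name requirements _
  show find_related_requirements_py component_name requirements
      = find_related_requirements_py_alt component_name requirements
  unfold find_related_requirements_py find_related_requirements_py_alt
  set kws := PySem.Str.split₀ (PySem.Str.lower component_name) with hkws
  have hne : ∀ kw ∈ kws, kw.toList ≠ [] := str_split₀_ne_nil _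
  rw [portA_eq_filter]
  apply List.filter_congr
  intro req _
  exact (matches_eq_any kws hne (PySem.Str.lower req)).symm
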